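-- pv_equiv track=rewrite | github.com/giff-h/AdventOfCode | 11/11.py | rule3
-- ===== SOURCE A (Python) =====
-- def rule3(password):
--     double_count = 0
--     i = 0
--     while i < (len(password) - 1):
--         if password[i] == password[i+1]:
--             double_count += 1
--             i += 2
--         else:
--             i += 1
--     return double_count >= 2
-- ===== SOURCE B (Python) =====
-- def rule3(password):
--     # Split into maximal runs of equal characters; each run of length L
--     # contributes L // 2 non-overlapping pairs.
--     total = 0
--     i = 0
--     n = len(password)
--     while i < n:
--         j = i
--         while j < n and password[j] == password[i]:
--             j += 1
--         total += (j - i) // 2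
--         i = j
--     return total >= 2
-- ===== Notes on version B (the rewrite author's own statement) =====
-- stated objective: simpler
-- what changed: Replaces the index-skipping greedy scan (i jumps by 2 on a match) with a run-length decomposition: split the password into maximal runs of equal characters and sum floor(L/2) pairs per run.
import Mathlib
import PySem

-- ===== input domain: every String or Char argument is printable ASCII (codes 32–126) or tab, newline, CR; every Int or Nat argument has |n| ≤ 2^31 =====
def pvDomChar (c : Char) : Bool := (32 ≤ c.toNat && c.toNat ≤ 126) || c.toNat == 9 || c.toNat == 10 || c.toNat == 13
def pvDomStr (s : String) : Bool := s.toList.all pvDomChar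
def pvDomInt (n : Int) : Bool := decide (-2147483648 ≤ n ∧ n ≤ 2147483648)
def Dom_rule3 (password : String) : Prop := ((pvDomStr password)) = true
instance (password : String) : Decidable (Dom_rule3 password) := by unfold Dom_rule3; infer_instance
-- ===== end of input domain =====

-- B counts non-overlapping doubled letters by maximal runs (floor(L/2) per run) instead of A's
-- greedy index-skipping scan; objective: simpler decomposition, same O(n) cost.

-- ===== PORT A =====
-- A's while loop over indices: look at adjacent pair, on a match count and skip 2, else step 1.
def pairCountA : List Char → Nat
  | a :: b :: t => if a = b then pairCountA t + 1 else pairCountA (b :: t)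
  | _ => 0

def rule3 (password : String) : Bool := decide (2 ≤ pairCountA password.toList)

-- ===== PORT B =====
-- B's outer while: take the maximal run starting at the head, add (run length) / 2, continue after it.
def runPairsB : List Char → Nat
  | [] => 0
  | a :: t =>
      ((t.takeWhile (· == a)).length + 1) / 2 + runPairsB (t.dropWhile (· == a))
termination_by l => l.length
decreasing_by
  exact Nat.lt_succ_of_le (t.length_dropWhile_le _)

def rule3_alt (password : String) : Bool := decide (2 ≤ runPairsB password.toList)

-- ===== PRECONDITION & SPEC =====
def Spec_rule3 (password : String) (out : Bool) : Prop := out = rule3_alt password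
instance (password : String) (out : Bool) : Decidable (Spec_rule3 password out) := by unfold Spec_rule3; infer_instance

-- ===== CLAIM (what is proved, stated in full; the proofs are below) =====
def Claim_equal_rule3 : Prop := ∀ (password : String), Dom_rule3 password → Spec_rule3 password (rule3 password)

-- ===== LEMMAS AND PROOFS =====

-- A's greedy scan on a run of n equal characters followed by a differently-headed rest
-- yields exactly n / 2 pairs plus the pairs of the rest.
theorem pairCountA_replicate (a : Char) (n : Nat) (rest : List Char)
    (h : ∀ b, rest.head? = some b → b ≠ a) :
    pairCountA (List.replicate n a ++ rest) = n / 2 + pairCountA rest := by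
  induction n using Nat.strong_induction_on with
  | _ n ih =>
    match n with
    | 0 => simp  -- replicate 0 ++ rest = rest, 0/2 = 0
    | 1 =>
      cases rest with
      | nil => simp [pairCountA]
      | cons b t =>
        have hb : b ≠ a := h b rfl
        simp only [List.replicate_succ, List.replicate_zero, List.cons_append,
          List.nil_append, pairCountA]
        rw [if_neg (fun hab : a = b => hb hab.symm)]
        omega
    | (k + 2) =>
      have hk := ih k (by omega)
      simp only [List.replicate_succ, List.cons_append]
      rw [show pairCountA (a :: a :: (List.replicate k a ++ rest)) =
            pairCountA (List.replicate k a ++ rest) + 1 from by simp [pairCountA]]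
      rw [hk]
      omega

theorem pairCountA_eq_runPairsB_aux :
    ∀ (n : Nat) (l : List Char), l.length ≤ n → pairCountA l = runPairsB l := by
  intro n
  induction n with
  | zero =>
    intro l hl
    rw [List.length_eq_zero_iff.mp (Nat.le_zero.mp hl)]
    simp [pairCountA, runPairsB.eq_def]
  | succ n ih =>
    intro l hl
    cases l with
    | nil => simp [pairCountA, runPairsB.eq_def]
    | cons a t =>
      have hsplit : a :: t =
          List.replicate ((t.takeWhile (· == a)).length + 1) a ++ t.dropWhile (· == a) := by
        have htw : t.takeWhile (· == a) = List.replicate (t.takeWhile (· == a)).length a := by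
          apply List.eq_replicate_of_mem
          intro b hb
          simpa using List.mem_takeWhile_imp hb
        conv_lhs => rw [← t.takeWhile_append_dropWhile (p := (· == a))]
        rw [List.replicate_succ, List.cons_append]
        conv_lhs => rw [htw]
      have hhead : ∀ b, (t.dropWhile (· == a)).head? = some b → b ≠ a := by
        intro b hb
        have := List.head?_dropWhile_not (p := (· == a)) (l := t)
        rw [hb] at this
        simpa using this
      have hA : pairCountA (a :: t) =
          ((t.takeWhile (· == a)).length + 1) / 2 + pairCountA (t.dropWhile (· == a)) := by
        conv_lhs => rw [hsplit]
        rw [pairCountA_replicate a _ _ hhead]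
      rw [hA, runPairsB.eq_def]
      rw [ih (t.dropWhile (· == a))
        (Nat.le_trans (t.length_dropWhile_le (· == a)) (by simpa using hl))]

theorem pairCountA_eq_runPairsB (l : List Char) : pairCountA l = runPairsB l :=
  pairCountA_eq_runPairsB_aux l.length l (Nat.le_refl _)

-- ===== VERDICT (by name: the statement is the Claim_ definition above) =====
theorem rule3_spec : Claim_equal_rule3 := by
  intro password _
  unfold Spec_rule3 rule3 rule3_alt
  rw [pairCountA_eq_runPairsB]
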